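-- pv_equiv track=rewrite | github.com/LeongWZ/SudokuSolver | sudoku_solver.py | inColumn
-- ===== SOURCE A (Python) =====
-- def inColumn(i, j, board):
--     if board[i][j] == '.':
--         return False
--
--     # searching above
--     ref_i = i-1
--     while ref_i >= 0:
--         if board[ref_i][j] == board[i][j]:
--             return True
--         ref_i -= 1
--
--     # searching below
--     ref_i = i+1
--     while ref_i <= 8:
--         if board[ref_i][j] == board[i][j]:
--             return True
--         ref_i += 1
--
--     return False
-- ===== SOURCE B (Python) =====
-- def inColumn(i, j, board):
--     val = board[i][j]
--     if val == '.':
--         return False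
--     count = 0
--     for r in range(min(9, len(board))):
--         if board[r][j] == val:
--             count += 1
--     return count > 1
-- ===== Notes on version B (the rewrite author's own statement) =====
-- stated objective: simpler
-- what changed: Replaced A's two self-skipping early-exit scans (above and below row i) with a single pass that counts occurrences of board[i][j] over the column's existing rows (range(min(9, len(board)))) and compares the count with 1.
-- outside the precondition, e.g. on inColumn(-1, 0, [['1'], ['2'], ['3']]): A returns True, B returns False
import Mathlib
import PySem

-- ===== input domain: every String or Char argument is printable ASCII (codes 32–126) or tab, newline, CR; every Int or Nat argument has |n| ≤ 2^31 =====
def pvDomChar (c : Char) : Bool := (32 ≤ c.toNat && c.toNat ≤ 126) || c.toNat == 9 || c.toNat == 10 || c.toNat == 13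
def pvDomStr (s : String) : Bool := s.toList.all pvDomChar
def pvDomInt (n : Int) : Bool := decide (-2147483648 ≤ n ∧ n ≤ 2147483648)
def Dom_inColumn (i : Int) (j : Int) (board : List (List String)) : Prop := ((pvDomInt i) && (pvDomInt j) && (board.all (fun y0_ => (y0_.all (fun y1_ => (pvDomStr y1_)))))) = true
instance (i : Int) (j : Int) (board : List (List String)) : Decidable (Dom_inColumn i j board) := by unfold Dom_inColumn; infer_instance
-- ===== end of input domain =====

-- B replaces A's two self-skipping early-exit scans of the column with one count-and-compare pass (objective: simpler).

-- ===== PORT A =====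
-- board[r][j] (inside Pre_ both indexings are in range, so the getD default is never used)
def cellAt (board : List (List String)) (r j : Int) : String :=
  (((PySem.List.pyGet? board r).bind (fun row => PySem.List.pyGet? row j)).getD "")

-- 'while ref_i >= 0: if board[ref_i][j] == board[i][j]: return True; ref_i -= 1'
def scanUp (board : List (List String)) (j : Int) (v : String) (refI : Int) : Bool :=
  if h : refI ≥ 0 then
    if cellAt board refI j = v then true else scanUp board j v (refI - 1)
  else false
termination_by (refI + 1).toNat
decreasing_by omega

-- 'while ref_i <= 8: if board[ref_i][j] == board[i][j]: return True; ref_i += 1'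
def scanDown (board : List (List String)) (j : Int) (v : String) (refI : Int) : Bool :=
  if h : refI ≤ 8 then
    if cellAt board refI j = v then true else scanDown board j v (refI + 1)
  else false
termination_by (9 - refI).toNat
decreasing_by omega

def inColumn (i : Int) (j : Int) (board : List (List String)) : Bool :=
  if cellAt board i j = "." then false
  else if scanUp board j (cellAt board i j) (i - 1) then true
  else if scanDown board j (cellAt board i j) (i + 1) then true
  else false

-- ===== PORT B =====
def inColumn_alt (i : Int) (j : Int) (board : List (List String)) : Bool :=
  let val := cellAt board i j
  if val = "." then false
  else
    decide (1 < (PySem.List.pyRange 0 (min 9 (board.length : Int)) 1).foldl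
      (fun acc r => if cellAt board r j = val then acc + 1 else acc) (0 : Int))

-- ===== PRECONDITION & SPEC =====
-- Pre_ admits: any input whose addressed cell reads '.' (both programs return False there), and
-- inputs with 0 ≤ i < 9, i and j in range for the first min(9, len) rows, on which either the board
-- has at least 9 rows or the cell's value reappears at another existing row of column j (so A's
-- early-exit scan returns before reaching a missing row); and negative i addressing a row of a
-- board of at most 9 rows whose cell value reappears at another row (both programs return True
-- there).  It excludes inputs where A raises
-- IndexError (a missing row or column entry reached before any match) and, restricting to the
-- natural Sudoku reading, inputs where Python's negative-index wraparound or rows beyond the ninth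
-- make A's self-skipping scans revisit or miss the cell itself (e.g. negative i with no duplicate,
-- where A's below-scan re-finds the very cell it started from).
def Pre_inColumn (i : Int) (j : Int) (board : List (List String)) : Prop :=
  ((PySem.List.pyGet? board i).bind (fun row => PySem.List.pyGet? row j)) = some "." ∨
  (0 ≤ i ∧ i < 9 ∧ i < (board.length : Int) ∧
   (∀ row ∈ board.take 9, -(row.length : Int) ≤ j ∧ j < (row.length : Int)) ∧
   (9 ≤ (board.length : Int) ∨
    ∃ r ∈ PySem.List.pyRange 0 (board.length : Int) 1,
      r ≠ i ∧ cellAt board r j = cellAt board i j)) ∨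
  (i < 0 ∧ 0 ≤ i + (board.length : Int) ∧ (board.length : Int) ≤ 9 ∧
   (∀ row ∈ board, -(row.length : Int) ≤ j ∧ j < (row.length : Int)) ∧
   ∃ r ∈ PySem.List.pyRange 0 (board.length : Int) 1,
     r ≠ i + (board.length : Int) ∧ cellAt board r j = cellAt board i j)
instance (i : Int) (j : Int) (board : List (List String)) : Decidable (Pre_inColumn i j board) := by
  unfold Pre_inColumn; infer_instance

def pvWitness_inColumn : Int × Int × List (List String) :=
  (0, 0, [["1"], ["2"], ["3"], ["4"], ["5"], ["6"], ["7"], ["8"], ["9"]])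

def Spec_inColumn (i : Int) (j : Int) (board : List (List String)) (out : Bool) : Prop := out = inColumn_alt i j board
instance (i : Int) (j : Int) (board : List (List String)) (out : Bool) : Decidable (Spec_inColumn i j board out) := by unfold Spec_inColumn; infer_instance

-- ===== CLAIM (what is proved, stated in full; the proofs are below) =====
def Claim_equal_inColumn : Prop := ∀ (i : Int) (j : Int) (board : List (List String)), Dom_inColumn i j board → Pre_inColumn i j board → Spec_inColumn i j board (inColumn i j board)

-- ===== LEMMAS AND PROOFS =====

lemma scanUp_iff (board : List (List String)) (j : Int) (v : String) :
    ∀ (n : Nat) (k : Int), (k + 1).toNat ≤ n →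
      (scanUp board j v k = true ↔ ∃ r : Int, 0 ≤ r ∧ r ≤ k ∧ cellAt board r j = v) := by
  intro n
  induction n with
  | zero =>
      intro k hk
      rw [scanUp]
      have h : ¬ k ≥ 0 := by omega
      simp only [h, dite_false]
      constructor
      · intro hfalse; cases hfalse
      · rintro ⟨r, h1, h2, _⟩; omega
  | succ n ih =>
      intro k hk
      rw [scanUp]
      by_cases h : k ≥ 0
      · simp only [h, dite_true]
        by_cases hc : cellAt board k j = v
        · simp only [hc, if_true]
          exact ⟨fun _ => ⟨k, by omega, le_refl _, hc⟩, fun _ => by trivial⟩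
        · simp only [hc, if_false]
          rw [ih (k - 1) (by omega)]
          constructor
          · rintro ⟨r, h1, h2, h3⟩; exact ⟨r, h1, by omega, h3⟩
          · rintro ⟨r, h1, h2, h3⟩
            rcases eq_or_lt_of_le h2 with heq | hlt
            · exact absurd (heq ▸ h3) hc
            · exact ⟨r, h1, by omega, h3⟩
      · simp only [h, dite_false]
        constructor
        · intro hfalse; cases hfalse
        · rintro ⟨r, h1, h2, _⟩; omega

lemma scanDown_iff (board : List (List String)) (j : Int) (v : String) :
    ∀ (n : Nat) (k : Int), (9 - k).toNat ≤ n →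
      (scanDown board j v k = true ↔ ∃ r : Int, k ≤ r ∧ r ≤ 8 ∧ cellAt board r j = v) := by
  intro n
  induction n with
  | zero =>
      intro k hk
      rw [scanDown]
      have h : ¬ k ≤ 8 := by omega
      simp only [h, dite_false]
      constructor
      · intro hfalse; cases hfalse
      · rintro ⟨r, h1, h2, _⟩; omega
  | succ n ih =>
      intro k hk
      rw [scanDown]
      by_cases h : k ≤ 8
      · simp only [h, dite_true]
        by_cases hc : cellAt board k j = v
        · simp only [hc, if_true]
          exact ⟨fun _ => ⟨k, le_refl _, by omega, hc⟩, fun _ => by trivial⟩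
        · simp only [hc, if_false]
          rw [ih (k + 1) (by omega)]
          constructor
          · rintro ⟨r, h1, h2, h3⟩; exact ⟨r, by omega, h2, h3⟩
          · rintro ⟨r, h1, h2, h3⟩
            rcases eq_or_lt_of_le h1 with heq | hlt
            · exact absurd (heq ▸ h3) hc
            · exact ⟨r, by omega, h2, h3⟩
      · simp only [h, dite_false]
        constructor
        · intro hfalse; cases hfalse
        · rintro ⟨r, h1, h2, _⟩; omega

lemma one_lt_length_of_two_mem {α : Type} {l : List α} {a b : α}
    (ha : a ∈ l) (hb : b ∈ l) (hne : a ≠ b) : 1 < l.length := by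
  obtain ⟨l1, l2, rfl⟩ := List.append_of_mem ha
  rcases List.mem_append.1 hb with h | h
  · have := List.length_pos_of_mem h
    simp [List.length_append]; omega
  · rcases List.mem_cons.1 h with h | h
    · exact absurd h.symm hne
    · have := List.length_pos_of_mem h
      simp [List.length_append]; omega

lemma length_le_one_of_all_eq {α : Type} {l : List α} {a : α}
    (hnd : l.Nodup) (hall : ∀ x ∈ l, x = a) : l.length ≤ 1 := by
  cases l with
  | nil => simp
  | cons x xs =>
      have hx : x = a := hall x (List.mem_cons_self ..)
      have hxs : xs = [] := by
        cases xs with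
        | nil => rfl
        | cons y ys =>
            have hy : y = a := hall y (by simp)
            have : x ∉ (y :: ys) := (List.nodup_cons.1 hnd).1
            exact absurd (by simp [hx, hy]) this
      simp [hxs]

lemma two_le_countP_iff (l : List Int) (p : Int → Prop) [DecidablePred p] (i : Int)
    (hnd : l.Nodup) (hi : i ∈ l) (hpi : p i) :
    2 ≤ l.countP (fun r => decide (p r)) ↔ ∃ r ∈ l, r ≠ i ∧ p r := by
  rw [List.countP_eq_length_filter]
  have hif : i ∈ l.filter (fun r => decide (p r)) := List.mem_filter.2 ⟨hi, by simp [hpi]⟩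
  have hndf : (l.filter (fun r => decide (p r))).Nodup := hnd.filter _
  constructor
  · intro hlen
    by_contra hno
    push Not at hno
    have hall : ∀ x ∈ l.filter (fun r => decide (p r)), x = i := by
      intro x hx
      rcases List.mem_filter.1 hx with ⟨hxl, hpx⟩
      by_contra hxi
      exact (hno x hxl hxi) (by simpa using hpx)
    have := length_le_one_of_all_eq hndf hall
    omega
  · rintro ⟨r, hrl, hri, hpr⟩
    have hrf : r ∈ l.filter (fun r => decide (p r)) := List.mem_filter.2 ⟨hrl, by simp [hpr]⟩
    have := one_lt_length_of_two_mem hrf hif hri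
    omega

-- Python's negative-index wraparound on the row index: board[i] = board[i + len] for -len ≤ i < 0
lemma cellAt_wrap (board : List (List String)) (j i : Int) (h0 : i < 0)
    (h1 : 0 ≤ i + (board.length : Int)) :
    cellAt board i j = cellAt board (i + (board.length : Int)) j := by
  unfold cellAt
  have h : PySem.List.pyGet? board i = PySem.List.pyGet? board (i + (board.length : Int)) := by
    simp only [PySem.List.pyGet?, PySem.List.pyIdx?]
    split_ifs <;> try omega
    have he : board.length - (-i).toNat = (i + (board.length : Int)).toNat := by omega
    rw [he]
  rw [h]

-- the non-'.' case over an abstract column bound N (= min 9 len at the call site)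
lemma scan_eq_count (board : List (List String)) (j : Int) (v : String) (i N : Int)
    (hv : v = cellAt board i j) (hi0 : 0 ≤ i) (hiN : i < N) (hN9 : N ≤ 9)
    (hdisj : N = 9 ∨ ∃ r ∈ PySem.List.pyRange 0 N 1, r ≠ i ∧ cellAt board r j = v) :
    (if scanUp board j v (i - 1) then true
     else if scanDown board j v (i + 1) then true else false)
    = decide (1 < (0 : Int) +
        ((PySem.List.pyRange 0 N 1).countP (fun r => decide (cellAt board r j = v)) : Int)) := by
  have hcount := two_le_countP_iff (PySem.List.pyRange 0 N 1)
    (fun r => cellAt board r j = v) i (PySem.List.nodup_pyRange_one 0 N)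
    (PySem.List.mem_pyRange_one.2 ⟨hi0, hiN⟩) hv.symm
  beta_reduce at hcount
  have hup := scanUp_iff board j v (i - 1 + 1).toNat (i - 1) (le_refl _)
  have hdown := scanDown_iff board j v (9 - (i + 1)).toNat (i + 1) (le_refl _)
  cases hu : scanUp board j v (i - 1) with
  | true =>
      simp only [if_true]
      obtain ⟨r, h1, h2, h3⟩ := hup.1 hu
      symm
      simp only [decide_eq_true_eq]
      have : 2 ≤ (PySem.List.pyRange 0 N 1).countP
          (fun r => decide (cellAt board r j = v)) :=
        hcount.2 ⟨r, PySem.List.mem_pyRange_one.2 ⟨h1, by omega⟩, by omega, h3⟩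
      omega
  | false =>
      simp only [Bool.false_eq_true, if_false]
      cases hd : scanDown board j v (i + 1) with
      | true =>
          simp only [if_true]
          symm
          simp only [decide_eq_true_eq]
          rcases hdisj with h9 | ⟨r, hrmem, hri, hrv⟩
          · obtain ⟨r, h1, h2, h3⟩ := hdown.1 hd
            have : 2 ≤ (PySem.List.pyRange 0 N 1).countP
                (fun r => decide (cellAt board r j = v)) :=
              hcount.2 ⟨r, PySem.List.mem_pyRange_one.2 ⟨by omega, by omega⟩, by omega, h3⟩
            omega
          · have : 2 ≤ (PySem.List.pyRange 0 N 1).countP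
                (fun r => decide (cellAt board r j = v)) :=
              hcount.2 ⟨r, hrmem, hri, hrv⟩
            omega
      | false =>
          simp only [Bool.false_eq_true, if_false]
          symm
          simp only [decide_eq_false_iff_not]
          intro hlt
          obtain ⟨r, hrl, hri, hpr⟩ := hcount.1 (by omega)
          rcases PySem.List.mem_pyRange_one.1 hrl with ⟨h0, h8⟩
          rcases lt_or_gt_of_ne hri with hlt' | hgt
          · exact absurd (hup.2 ⟨r, h0, by omega, hpr⟩) (by simp [hu])
          · exact absurd (hdown.2 ⟨r, by omega, by omega, hpr⟩) (by simp [hd])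

theorem inColumn_spec : Claim_equal_inColumn := by
  intro i j board _ hpre
  show inColumn i j board = inColumn_alt i j board
  by_cases hdot : cellAt board i j = "."
  · unfold inColumn inColumn_alt
    simp [hdot]
  · rcases hpre with hcell | ⟨hi0, hi9, hilen, _, hdisj⟩ | ⟨hineg, hipos, hlen9, _, r, hrmem, hri, hrv⟩
    · exact absurd (by unfold cellAt; rw [hcell]; rfl) hdot
    · unfold inColumn inColumn_alt
      set v := cellAt board i j with hv
      simp only [hdot, if_false]
      rw [PySem.List.foldl_ite_add_one]
      refine scan_eq_count board j v i (min 9 (board.length : Int)) hv hi0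
        (lt_min hi9 hilen) (min_le_left _ _) ?_
      by_cases h9 : 9 ≤ (board.length : Int)
      · exact Or.inl (min_eq_left h9)
      · rcases hdisj with h9' | ⟨r, hrmem, hri, hrv⟩
        · exact absurd h9' h9
        · refine Or.inr ⟨r, ?_, hri, hrv.trans hv.symm⟩
          rw [min_eq_right (by omega)]
          exact hrmem

    · unfold inColumn inColumn_alt
      set v := cellAt board i j with hv
      simp only [hdot, if_false]
      rw [PySem.List.foldl_ite_add_one]
      have hwrap : cellAt board (i + (board.length : Int)) j = v :=
        (cellAt_wrap board j i hineg hipos).symm.trans hv.symm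
      have hsU : scanUp board j v (i - 1) = false := by
        cases h : scanUp board j v (i - 1) with
        | false => rfl
        | true =>
            obtain ⟨r', h1', h2', _⟩ :=
              (scanUp_iff board j v (i - 1 + 1).toNat (i - 1) (le_refl _)).1 h
            omega
      have hsD : scanDown board j v (i + 1) = true :=
        (scanDown_iff board j v (9 - (i + 1)).toNat (i + 1) (le_refl _)).2
          ⟨i + (board.length : Int), by omega, by omega, hwrap⟩
      simp only [hsU, hsD, Bool.false_eq_true, if_false, if_true]
      symm
      simp only [decide_eq_true_eq]
      rw [min_eq_right hlen9]
      have hcount := two_le_countP_iff (PySem.List.pyRange 0 (board.length : Int) 1)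
        (fun r => cellAt board r j = v) (i + (board.length : Int))
        (PySem.List.nodup_pyRange_one 0 _)
        (PySem.List.mem_pyRange_one.2 ⟨hipos, by omega⟩) hwrap
      beta_reduce at hcount
      have h2c := hcount.2 ⟨r, hrmem, hri, hrv.trans hv.symm⟩
      omega
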